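-- pv_equiv track=rewrite | github.com/jayetri/DrugEHRQA-A-Question-Answering-Dataset-on-Structured-and-Unstructured-Electronic-Health-Records | dataset_generation_from_scratch/generate_multimodal_dataset.py | get_equality_numeric
-- ===== SOURCE A (Python) =====
-- def get_equality_numeric(str1, str2):
--     n_str1 = ""
--     i = 0
--     while i < len(str1):
--         if '0' <= str1[i] <= '9':
--             if n_str1 != "":
--                 return False
--             n_str1 += str1[i]
--             i += 1
--             while i < len(str1) and '0' <= str1[i] <= '9':
--                 n_str1 += str1[i]
--                 i += 1
--         elif i >= len(str1):
--             break
--         else: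
--             i += 1
--
--     n_str2 = ""
--     i = 0
--     while i < len(str2):
--         if '0' <= str2[i] <= '9':
--             if n_str2 != "":
--                 return False
--             n_str2 += str2[i]
--             i += 1
--             while i < len(str2) and '0' <= str2[i] <= '9':
--                 n_str2 += str2[i]
--                 i += 1
--         elif i >= len(str2):
--             break
--         else:
--             i += 1
--     if n_str1 == "" or n_str2 == "":
--         return False
--     if n_str1 == n_str2:
--         return True
--     return False
-- ===== SOURCE B (Python) =====
-- def get_equality_numeric(str1, str2):
--     def single_run(s):
--         # positions of all digit characters
--         idxs = [k for k, c in enumerate(s) if '0' <= c <= '9']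
--         if not idxs:
--             return None
--         # digits form one maximal run iff their positions are consecutive
--         if any(b - a != 1 for a, b in zip(idxs, idxs[1:])):
--             return None
--         return s[idxs[0]:idxs[-1] + 1]
--     r1 = single_run(str1)
--     return r1 is not None and r1 == single_run(str2)
-- ===== Notes on version B (the rewrite author's own statement) =====
-- stated objective: faster
-- what changed: Replaces A's nested while-loop scanning state machine (per-character string concatenation, early returns on a second run, manual index arithmetic) by a positional computation: build the list of digit positions via enumerate, decide 'exactly one maximal run' by checking that consecutive positions differ by 1, and extract the number by slicing from the first to the last digit position.
import Mathlib
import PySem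

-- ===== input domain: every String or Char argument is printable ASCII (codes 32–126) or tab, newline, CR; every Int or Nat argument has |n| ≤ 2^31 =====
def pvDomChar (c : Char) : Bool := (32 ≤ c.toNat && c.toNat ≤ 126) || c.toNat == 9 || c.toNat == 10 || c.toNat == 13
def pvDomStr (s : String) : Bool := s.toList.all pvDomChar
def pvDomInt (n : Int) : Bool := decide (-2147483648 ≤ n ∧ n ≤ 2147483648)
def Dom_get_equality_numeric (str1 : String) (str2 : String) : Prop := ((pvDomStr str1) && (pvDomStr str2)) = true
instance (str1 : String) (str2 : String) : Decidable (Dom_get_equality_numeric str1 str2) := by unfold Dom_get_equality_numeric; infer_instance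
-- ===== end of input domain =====

-- B replaces A's while-loop scanning state machine by a positional computation: the list of
-- digit positions, an adjacency check on consecutive positions (one maximal run iff all
-- consecutive position gaps are 1), and a slice from the first to the last digit position.
-- Same asymptotic cost; the comparison stays on strings, so leading zeros matter as in A.
-- Python strings are represented internally as List Char (comparison and emptiness tests coincide).

-- ===== PORT A =====
-- '0' <= c <= '9' (ASCII digit test, both ports)
def pvIsDig (c : Char) : Bool := decide ('0' ≤ c) && decide (c ≤ '9')

-- inner while of A: consume the digit run, appending to n_str
def pvInnerA : List Char → List Char → List Char × List Char
  | [], n => (n, [])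
  | c :: cs, n => if pvIsDig c then pvInnerA cs (n ++ [c]) else (n, c :: cs)

theorem pvInnerA_len (cs : List Char) : ∀ n, (pvInnerA cs n).2.length ≤ cs.length := by
  induction cs with
  | nil => intro n; simp [pvInnerA]
  | cons c cs ih =>
    intro n
    simp only [pvInnerA]
    split
    · exact le_trans (ih _) (Nat.le_succ _)
    · simp

-- outer while of A: scan, returning none where Python A returns False early (second run seen)
def pvOuterA : List Char → List Char → Option (List Char)
  | [], n => some n
  | c :: cs, n =>
    if pvIsDig c then
      if n ≠ [] then none
      else
        let p := pvInnerA cs (n ++ [c])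
        pvOuterA p.2 p.1
    else pvOuterA cs n
termination_by cs _ => cs.length
decreasing_by
  · exact Nat.lt_succ_of_le (pvInnerA_len cs _)
  · simp

def get_equality_numeric (str1 : String) (str2 : String) : Bool :=
  match pvOuterA str1.toList [] with
  | none => false
  | some n1 =>
    match pvOuterA str2.toList [] with
    | none => false
    | some n2 =>
      if n1 = [] ∨ n2 = [] then false
      else if n1 = n2 then true else false

-- ===== PORT B =====
-- [k for k, c in enumerate(s) if '0' <= c <= '9']
def pvDigIdx (cs : List Char) : List Int :=
  ((PySem.List.enumerate cs).filter (fun p => pvIsDig p.2)).map (·.1)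

-- 'not any(b - a != 1 for a, b in zip(idxs, idxs[1:]))': walk consecutive pairs
def pvChainOk : List Int → Bool
  | a :: b :: rest => (b - a == 1) && pvChainOk (b :: rest)
  | _ => true

-- single_run helper of B: digit positions must be nonempty and consecutive; then slice
def pvSingleRun (cs : List Char) : Option (List Char) :=
  match pvDigIdx cs with
  | [] => none
  | i :: rest =>
    if pvChainOk (i :: rest) then
      some (PySem.List.slice cs (some i) (some ((i :: rest).getLastD 0 + 1)))
    else none

def get_equality_numeric_alt (str1 : String) (str2 : String) : Bool :=
  match pvSingleRun str1.toList with
  | none => false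
  | some r1 =>
    match pvSingleRun str2.toList with
    | none => false
    | some r2 => r1 = r2

-- ===== PRECONDITION & SPEC =====
def Spec_get_equality_numeric (str1 : String) (str2 : String) (out : Bool) : Prop := out = get_equality_numeric_alt str1 str2
instance (str1 : String) (str2 : String) (out : Bool) : Decidable (Spec_get_equality_numeric str1 str2 out) := by unfold Spec_get_equality_numeric; infer_instance

-- ===== CLAIM (what is proved, stated in full; the proofs are below) =====
def Claim_equal_get_equality_numeric : Prop := ∀ (str1 : String) (str2 : String), Dom_get_equality_numeric str1 str2 → Spec_get_equality_numeric str1 str2 (get_equality_numeric str1 str2)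

-- ===== LEMMAS AND PROOFS =====

-- proof-only: the list of maximal digit runs of a string
def pvRunsF : List Char → List (List Char) → List Char → List (List Char)
  | [], out, cur => if cur ≠ [] then out ++ [cur] else out
  | c :: cs, out, cur =>
    if pvIsDig c then pvRunsF cs out (cur ++ [c])
    else if cur ≠ [] then pvRunsF cs (out ++ [cur]) []
    else pvRunsF cs out []

-- proof-only: recursive characterisation of pvDigIdx
def pvIdxR : List Char → List Int
  | [] => []
  | c :: cs => if pvIsDig c then 0 :: (pvIdxR cs).map (· + 1) else (pvIdxR cs).map (· + 1)

-- proof-only: [0, 1, …, n-1] built in pvIdxR's shape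
def pvIntRange : Nat → List Int
  | 0 => []
  | n + 1 => 0 :: (pvIntRange n).map (· + 1)

theorem pvRunsF_out (cs : List Char) : ∀ out cur, pvRunsF cs out cur = out ++ pvRunsF cs [] cur := by
  induction cs with
  | nil => intro out cur; simp only [pvRunsF]; split <;> simp
  | cons c cs ih =>
    intro out cur
    simp only [pvRunsF]
    split
    · exact ih out _
    · split
      · rw [ih (out ++ [cur]) [], ih ([] ++ [cur]) []]; simp
      · exact ih out []

theorem pvInnerA_fst_ne (cs : List Char) : ∀ n, n ≠ [] → (pvInnerA cs n).1 ≠ [] := by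
  induction cs with
  | nil => intro n h; simpa [pvInnerA]
  | cons c cs ih =>
    intro n h
    simp only [pvInnerA]
    split
    · exact ih _ (by simp)
    · simpa

theorem pvLemI (cs : List Char) : ∀ cur, cur ≠ [] →
    pvRunsF cs [] cur = (pvInnerA cs cur).1 :: pvRunsF (pvInnerA cs cur).2 [] [] := by
  induction cs with
  | nil => intro cur h; simp [pvRunsF, pvInnerA, h]
  | cons c cs ih =>
    intro cur h
    by_cases hd : pvIsDig c = true
    · simp only [pvRunsF, pvInnerA, hd, if_pos]
      exact ih _ (by simp)
    · simp only [pvRunsF, pvInnerA, hd, if_neg, Bool.false_eq_true, not_false_iff, if_pos h]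
      rw [pvRunsF_out]
      simp

theorem pvLemN (cs : List Char) : ∀ n, n ≠ [] →
    pvOuterA cs n = if pvRunsF cs [] [] = [] then some n else none := by
  induction cs with
  | nil => intro n h; simp [pvOuterA, pvRunsF]
  | cons c cs ih =>
    intro n h
    by_cases hd : pvIsDig c = true
    · rw [pvOuterA]
      simp only [hd, if_pos, if_pos h, pvRunsF]
      rw [pvLemI cs ([] ++ [c]) (by simp)]
      simp
    · rw [pvOuterA]
      simp only [hd, Bool.false_eq_true, if_neg, not_false_iff]
      have heq : pvRunsF (c :: cs) [] [] = pvRunsF cs [] [] := by simp [pvRunsF, hd]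
      rw [heq]
      exact ih n h

theorem pvLemM (cs : List Char) : pvOuterA cs [] =
    (match pvRunsF cs [] [] with
     | [] => some []
     | [r] => some r
     | _ => none) := by
  induction cs with
  | nil => simp [pvOuterA, pvRunsF]
  | cons c cs ih =>
    by_cases hd : pvIsDig c = true
    · rw [pvOuterA]
      simp only [hd, if_pos, ne_eq, not_true_eq_false, if_neg, List.nil_append,
        not_false_iff]
      have hne : ([c] : List Char) ≠ [] := by simp
      have h1 : (pvInnerA cs [c]).1 ≠ [] := pvInnerA_fst_ne cs [c] hne
      rw [pvLemN _ _ h1]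
      have : pvRunsF (c :: cs) [] [] = (pvInnerA cs [c]).1 :: pvRunsF (pvInnerA cs [c]).2 [] [] := by
        simp only [pvRunsF, hd, if_pos, List.nil_append]
        exact pvLemI cs [c] hne
      rw [this]
      cases hrest : pvRunsF (pvInnerA cs [c]).2 [] [] with
      | nil => simp
      | cons a b => simp
    · rw [pvOuterA]
      simp only [hd, Bool.false_eq_true, if_neg, not_false_iff]
      rw [ih]
      have : pvRunsF (c :: cs) [] [] = pvRunsF cs [] [] := by
        simp [pvRunsF, hd]
      rw [this]

theorem pvRuns_ne (cs : List Char) : ∀ out cur, ([] : List Char) ∉ out →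
    ([] : List Char) ∉ pvRunsF cs out cur := by
  induction cs with
  | nil =>
    intro out cur hout
    simp only [pvRunsF]
    split
    · simp_all
    · exact hout
  | cons c cs ih =>
    intro out cur hout
    simp only [pvRunsF]
    split
    · exact ih out _ hout
    · split
      · exact ih _ [] (by simp_all)
      · exact ih out [] hout

-- pvDigIdx computes pvIdxR (enumerate-filter-map vs the recursive index list)
theorem pvEnumAux (cs : List Char) : ∀ (s : Int),
    ((PySem.List.enumerate cs s).filter (fun p => pvIsDig p.2)).map (fun p => p.1) =
      (pvIdxR cs).map (· + s) := by
  induction cs with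
  | nil => intro s; simp [PySem.List.enumerate, pvIdxR]
  | cons c cs ih =>
    intro s
    rw [PySem.List.enumerate_cons]
    by_cases hd : pvIsDig c = true
    · simp only [List.filter_cons, hd, if_pos, List.map_cons, ih (s + 1), pvIdxR, List.map_map]
      congr 1
      · omega
      · apply List.map_congr_left; intro x _; simp; omega
    · simp only [List.filter_cons, hd, Bool.false_eq_true, if_neg, not_false_iff,
        ih (s + 1), pvIdxR, List.map_map]
      apply List.map_congr_left; intro x _; simp; omega

theorem pvDigIdx_eq (cs : List Char) : pvDigIdx cs = pvIdxR cs := by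
  unfold pvDigIdx
  rw [pvEnumAux cs 0]
  simp

-- pvInnerA is takeWhile / dropWhile
theorem pvInnerA_char (cs : List Char) : ∀ n,
    pvInnerA cs n = (n ++ cs.takeWhile pvIsDig, cs.dropWhile pvIsDig) := by
  induction cs with
  | nil => intro n; simp [pvInnerA]
  | cons c cs ih =>
    intro n
    by_cases hd : pvIsDig c = true
    · simp [pvInnerA, hd, ih]
    · simp [pvInnerA, hd]

theorem pvIdxR_nonneg (cs : List Char) : ∀ x ∈ pvIdxR cs, 0 ≤ x := by
  induction cs with
  | nil => simp [pvIdxR]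
  | cons c cs ih =>
    intro x hx
    simp only [pvIdxR] at hx
    split at hx
    · simp only [List.mem_cons, List.mem_map] at hx
      rcases hx with rfl | ⟨y, hy, rfl⟩
      · omega
      · have := ih y hy; omega
    · simp only [List.mem_map] at hx
      obtain ⟨y, hy, rfl⟩ := hx
      have := ih y hy; omega

theorem pvIdxR_nil_iff (cs : List Char) : pvIdxR cs = [] ↔ pvRunsF cs [] [] = [] := by
  induction cs with
  | nil => simp [pvIdxR, pvRunsF]
  | cons c cs ih =>
    by_cases hd : pvIsDig c = true
    · have h1 : pvIdxR (c :: cs) = 0 :: (pvIdxR cs).map (· + 1) := by simp [pvIdxR, hd]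
      have h2 : pvRunsF (c :: cs) [] [] =
          (pvInnerA cs [c]).1 :: pvRunsF (pvInnerA cs [c]).2 [] [] := by
        simp only [pvRunsF, hd, if_pos, List.nil_append]
        exact pvLemI cs [c] (by simp)
      simp [h1, h2]
    · have h1 : pvIdxR (c :: cs) = (pvIdxR cs).map (· + 1) := by simp [pvIdxR, hd]
      have h2 : pvRunsF (c :: cs) [] [] = pvRunsF cs [] [] := by simp [pvRunsF, hd]
      simp [h1, h2, ih]

theorem pvIdxR_split (ds : List Char) (rest : List Char) (h : ∀ c ∈ ds, pvIsDig c = true) :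
    pvIdxR (ds ++ rest) = pvIntRange ds.length ++ (pvIdxR rest).map (· + (ds.length : Int)) := by
  induction ds with
  | nil => simp [pvIntRange]
  | cons d ds ih =>
    have hd : pvIsDig d = true := h d (by simp)
    have ih' := ih (fun c hc => h c (by simp [hc]))
    simp only [List.cons_append, pvIdxR, hd, if_pos, ih', List.length_cons, pvIntRange,
      List.map_append, List.map_map]
    congr 2
    apply List.map_congr_left; intro x _; simp; omega

theorem pvChainOk_cons_cons (a b : Int) (l : List Int) :
    pvChainOk (a :: b :: l) = ((b - a == 1) && pvChainOk (b :: l)) := rfl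

theorem pvChainOk_iff (l : List Int) : pvChainOk l = true ↔ List.IsChain (fun a b => b = a + 1) l := by
  induction l with
  | nil => simp [pvChainOk]
  | cons a t ih =>
    cases t with
    | nil => simp [pvChainOk]
    | cons b t' =>
      rw [List.isChain_cons_cons, ← ih]
      simp only [pvChainOk, Bool.and_eq_true, beq_iff_eq]
      constructor
      · rintro ⟨h1, h2⟩; exact ⟨by omega, h2⟩
      · rintro ⟨h1, h2⟩; exact ⟨by omega, h2⟩

theorem pvChainOk_map_add (l : List Int) (k : Int) : pvChainOk (l.map (· + k)) = pvChainOk l := by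
  induction l with
  | nil => simp
  | cons a t ih =>
    cases t with
    | nil => simp [pvChainOk]
    | cons b t' =>
      simp only [List.map_cons] at ih ⊢
      simp only [pvChainOk, ih]
      congr 1
      have : b + k - (a + k) = b - a := by omega
      rw [this]

theorem pvIntRange_getLast? (n : Nat) : (pvIntRange (n + 1)).getLast? = some (n : Int) := by
  induction n with
  | zero => simp [pvIntRange]
  | succ m ih =>
    have h1 : pvIntRange (m + 2) = 0 :: (pvIntRange (m + 1)).map (· + 1) := rfl
    have h2 : pvIntRange (m + 1) = 0 :: (pvIntRange m).map (· + 1) := rfl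
    rw [h1, h2, List.map_cons, List.getLast?_cons_cons]
    have hx : ((0 : Int) + 1) :: ((pvIntRange m).map (· + 1)).map (· + 1) =
        ((pvIntRange (m + 1)).map (· + 1)) := by
      rw [h2, List.map_cons]
    rw [hx, List.getLast?_map, ih]
    simp

theorem pvIntRange_chainOk (n : Nat) : pvChainOk (pvIntRange n) = true := by
  induction n with
  | zero => simp [pvIntRange, pvChainOk]
  | succ m ih =>
    cases m with
    | zero => simp [pvIntRange, pvChainOk]
    | succ k =>
      have h1 : pvIntRange (k + 2) = 0 :: (pvIntRange (k + 1)).map (· + 1) := rfl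
      have h2 : pvIntRange (k + 1) = 0 :: (pvIntRange k).map (· + 1) := rfl
      rw [h1, h2, List.map_cons, pvChainOk_cons_cons]
      have hx : ((0 : Int) + 1) :: ((pvIntRange k).map (· + 1)).map (· + 1) =
          (pvIntRange (k + 1)).map (· + 1) := by
        rw [h2, List.map_cons]
      rw [hx, pvChainOk_map_add, ih]
      rfl

-- the slice of a cons with both bounds shifted by one
theorem pvSliceShift (c : Char) (cs : List Char) (a b : Int) (ha : 0 ≤ a) (hb : 0 ≤ b) :
    PySem.List.slice (c :: cs) (some (a + 1)) (some (b + 1)) = PySem.List.slice cs (some a) (some b) := by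
  rw [PySem.List.slice_toNat _ (by omega) (by omega), PySem.List.slice_toNat _ ha hb]
  rw [show (a + 1).toNat = a.toNat + 1 by omega]
  rw [show (b + 1).toNat - (a.toNat + 1) = b.toNat - a.toNat by omega, List.drop_succ_cons]

-- head of pvIdxR of a list that does not start with a digit is ≥ 1
theorem pvIdxR_head_pos (r : List Char) (h : pvIdxR r ≠ []) (hr : r.dropWhile pvIsDig = r)
    (x : Int) (hx : x ∈ pvIdxR r) : 1 ≤ x := by
  cases r with
  | nil => simp [pvIdxR] at h
  | cons c r' =>
    have hc : pvIsDig c = false := by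
      have := List.head_dropWhile_not pvIsDig (l := c :: r') (by simp [hr])
      simp only [hr, List.head_cons] at this
      simpa using this
    simp only [pvIdxR, hc, Bool.false_eq_true, if_neg, not_false_iff] at hx
    obtain ⟨y, hy, rfl⟩ := List.mem_map.mp hx
    have := pvIdxR_nonneg r' y hy; omega

-- the key bridge: B's single_run equals the match on A's run list
theorem pvKey (cs : List Char) : pvSingleRun cs =
    (match pvRunsF cs [] [] with
     | [r] => some r
     | _ => none) := by
  induction cs with
  | nil => simp [pvSingleRun, pvDigIdx_eq, pvIdxR, pvRunsF]
  | cons c cs ih =>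
    by_cases hd : pvIsDig c = true
    · -- digit head: peel off the whole leading digit run
      clear ih
      set t := cs.takeWhile pvIsDig with ht
      set r := cs.dropWhile pvIsDig with hrw
      have hcs : cs = t ++ r := (List.takeWhile_append_dropWhile).symm
      have hdig : ∀ x ∈ c :: t, pvIsDig x = true := by
        intro x hx
        rcases hx with _ | hx
        · exact hd
        · exact List.mem_takeWhile_imp (by assumption)
      have hruns : pvRunsF (c :: cs) [] [] = (c :: t) :: pvRunsF r [] [] := by
        simp only [pvRunsF, hd, if_pos, List.nil_append]
        rw [pvLemI cs [c] (by simp), pvInnerA_char, ← ht, ← hrw]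
        simp
      have hidx : pvIdxR (c :: cs) =
          pvIntRange (t.length + 1) ++ (pvIdxR r).map (· + ((t.length : Int) + 1)) := by
        have : c :: cs = (c :: t) ++ r := by rw [hcs]; simp
        rw [this, pvIdxR_split (c :: t) r hdig]
        simp only [List.length_cons]
        norm_cast
      set n := t.length with hn
      cases hri : pvIdxR r with
      | nil =>
        have hrr : pvRunsF r [] [] = [] := (pvIdxR_nil_iff r).mp hri
        rw [hruns, hrr]
        have hidx2 : pvIdxR (c :: cs) = 0 :: (pvIntRange n).map (· + 1) := by
          rw [hidx, hri]; simp only [List.map_nil, List.append_nil]; rfl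
        unfold pvSingleRun
        rw [pvDigIdx_eq, hidx2]
        have hco : pvChainOk ((0 : Int) :: (pvIntRange n).map (· + 1)) = true :=
          pvIntRange_chainOk (n + 1)
        have hlast : ((0 : Int) :: (pvIntRange n).map (· + 1)).getLastD 0 = (n : Int) := by
          rw [List.getLastD_eq_getLast?,
            show ((0 : Int) :: (pvIntRange n).map (· + 1)) = pvIntRange (n + 1) from rfl,
            pvIntRange_getLast?]
          rfl
        simp only [hco, hlast, if_pos]
        have hslice : PySem.List.slice (c :: cs) (some 0) (some ((n : Int) + 1)) = c :: t := by
          have : ((n : Int) + 1) = ((n + 1 : Nat) : Int) := by push_cast; omega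
          rw [this, PySem.List.slice_toNat _ (by omega) (by omega)]
          simp only [Int.toNat_natCast, Int.toNat_zero, List.drop_zero, Nat.sub_zero]
          have hlen : (c :: t).length = n + 1 := by simp [hn]
          have : c :: cs = (c :: t) ++ r := by rw [hcs]; simp
          rw [this, ← hlen, List.take_left]
        rw [hslice]
      | cons h tl =>
        have hrr : pvRunsF r [] [] ≠ [] := by
          intro hc; exact (by simp [hri] : pvIdxR r ≠ []) ((pvIdxR_nil_iff r).mpr hc)
        have hpos : 1 ≤ h := by
          apply pvIdxR_head_pos r (by simp [hri]) _ h (by simp [hri])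
          rw [hrw, List.dropWhile_idempotent]
        -- A side: at least two runs
        rw [hruns]
        cases hx : pvRunsF r [] [] with
        | nil => exact absurd hx hrr
        | cons x xs =>
          -- B side: chain check fails at the junction
          have hidx2 : pvIdxR (c :: cs) =
              pvIntRange (n + 1) ++ (h + ((n : Int) + 1)) :: tl.map (· + ((n : Int) + 1)) := by
            rw [hidx, hri]; simp
          have hbad : pvChainOk (pvIdxR (c :: cs)) = false := by
            by_contra hcon
            have htrue : pvChainOk (pvIdxR (c :: cs)) = true := by
              cases hh : pvChainOk (pvIdxR (c :: cs)) with
              | false => exact absurd hh hcon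
              | true => rfl
            rw [hidx2] at htrue
            have hchain := (pvChainOk_iff _).mp htrue
            rw [List.isChain_append] at hchain
            have hrel := hchain.2.2 (n : Int) (by rw [pvIntRange_getLast?]; simp)
              (h + ((n : Int) + 1)) (by simp)
            omega
          have hidx3 : pvIdxR (c :: cs) = 0 :: ((pvIntRange n).map (· + 1) ++
              (h + ((n : Int) + 1)) :: tl.map (· + ((n : Int) + 1))) := by
            rw [hidx2]; rfl
          have hbad3 : pvChainOk ((0 : Int) :: ((pvIntRange n).map (· + 1) ++
              (h + ((n : Int) + 1)) :: tl.map (· + ((n : Int) + 1)))) = false := by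
            rw [← hidx3]; exact hbad
          unfold pvSingleRun
          rw [pvDigIdx_eq, hidx3]
          simp only [hbad3]
          simp
    · -- non-digit head: both sides ignore c
      have hruns : pvRunsF (c :: cs) [] [] = pvRunsF cs [] [] := by simp [pvRunsF, hd]
      have hidx : pvIdxR (c :: cs) = (pvIdxR cs).map (· + 1) := by simp [pvIdxR, hd]
      rw [hruns, ← ih]
      unfold pvSingleRun
      rw [pvDigIdx_eq, pvDigIdx_eq, hidx]
      cases hci : pvIdxR cs with
      | nil => simp
      | cons i rest =>
        simp only [List.map_cons]
        have hco : pvChainOk ((i + 1) :: rest.map (· + 1)) = pvChainOk (i :: rest) := by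
          have := pvChainOk_map_add (i :: rest) 1
          simpa using this
        rw [hco]
        cases hok : pvChainOk (i :: rest) with
        | false => simp
        | true =>
          simp only [if_pos]
          have hlast : ((i + 1) :: rest.map (· + 1)).getLastD 0 = (i :: rest).getLastD 0 + 1 := by
            have : (i + 1) :: rest.map (· + 1) = (i :: rest).map (· + 1) := by simp
            rw [this, List.getLastD_eq_getLast?, List.getLastD_eq_getLast?,
              List.getLast?_map, List.getLast?_eq_some_getLast (l := i :: rest) (by simp)]
            simp
          rw [hlast]
          have h0i : 0 ≤ i := pvIdxR_nonneg cs i (by simp [hci])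
          have h0j : 0 ≤ (i :: rest).getLastD 0 := by
            apply pvIdxR_nonneg cs
            rw [hci, List.getLastD_eq_getLast?, List.getLast?_eq_some_getLast (by simp)]
            simp [List.getLast_mem]
          have hshift := pvSliceShift c cs i ((i :: rest).getLastD 0 + 1) h0i (by omega)
          have harg : (i :: rest).getLastD 0 + 1 + 1 = ((i :: rest).getLastD 0 + 1) + 1 := rfl
          rw [harg, hshift]

-- ===== VERDICT (by name: the statement is the Claim_ definition above) =====
theorem get_equality_numeric_spec : Claim_equal_get_equality_numeric := by
  intro str1 str2 _
  unfold Spec_get_equality_numeric get_equality_numeric get_equality_numeric_alt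
  rw [pvLemM, pvLemM, pvKey, pvKey]
  have h1 := pvRuns_ne str1.toList [] [] (by simp)
  have h2 := pvRuns_ne str2.toList [] [] (by simp)
  cases hr1 : pvRunsF str1.toList [] [] with
  | nil =>
    cases hr2 : pvRunsF str2.toList [] [] with
    | nil => simp
    | cons a b => cases b <;> simp
  | cons a b =>
    cases b with
    | nil =>
      have ha : a ≠ [] := by rw [hr1] at h1; simp_all
      cases hr2 : pvRunsF str2.toList [] [] with
      | nil => simp [ha]
      | cons a' b' =>
        cases b' with
        | nil =>
          have ha' : a' ≠ [] := by rw [hr2] at h2; simp_all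
          by_cases he : a = a' <;> simp [he, ha, ha']
        | cons x y => simp
    | cons x y =>
      cases hr2 : pvRunsF str2.toList [] [] with
      | nil => simp
      | cons a' b' => cases b' <;> simp
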